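-- pv_equiv track=rewrite | github.com/shreyjindal81/CSE-331 | CC4/solution.py | challenger_finder
-- ===== SOURCE A (Python) =====
-- from typing import List
--
-- def challenger_finder(stocks_list: List[int], k: int) -> List[int]:
--     """
--     this function lists the number of possible matches for each player
--     INPUT : list of player stocks
--     OUTPUT : list of corresponding matches.
--     """
--     result = []
--     for i in range(len(stocks_list)):
--         result.append(0)
--
--     for i in range(0, len(stocks_list)-1):
--         for j in range(i+1, len(stocks_list)):
--             if abs(stocks_list[i] - stocks_list[j]) <= k:
--                 result[i] += 1
--                 result[j] += 1
--     return result
-- ===== SOURCE B (Python) =====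
-- from typing import List
--
-- def _count_lt(s: List[int], x: int) -> int:
--     # number of elements of sorted s strictly below x (binary search, bisect_left)
--     lo, hi = 0, len(s)
--     while lo < hi:
--         mid = (lo + hi) // 2
--         if s[mid] < x:
--             lo = mid + 1
--         else:
--             hi = mid
--     return lo
--
-- def _count_le(s: List[int], x: int) -> int:
--     # number of elements of sorted s at most x (binary search, bisect_right)
--     lo, hi = 0, len(s)
--     while lo < hi:
--         mid = (lo + hi) // 2
--         if s[mid] <= x:
--             lo = mid + 1
--         else:
--             hi = mid
--     return lo
--
-- def challenger_finder(stocks_list: List[int], k: int) -> List[int]: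
--     if k < 0:
--         return [0] * len(stocks_list)
--     s = sorted(stocks_list)
--     return [_count_le(s, v + k) - _count_lt(s, v - k) - 1 for v in stocks_list]
-- ===== Notes on version B (the rewrite author's own statement) =====
-- stated objective: faster
-- what changed: Replaces A's O(n^2) all-pairs double loop (incrementing two counters per qualifying pair) by sorting the values once and counting, for each element v, the elements in [v-k, v+k] with two hand-written binary searches, minus one for the element itself (all-zero short-circuit when k < 0).
import Mathlib
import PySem

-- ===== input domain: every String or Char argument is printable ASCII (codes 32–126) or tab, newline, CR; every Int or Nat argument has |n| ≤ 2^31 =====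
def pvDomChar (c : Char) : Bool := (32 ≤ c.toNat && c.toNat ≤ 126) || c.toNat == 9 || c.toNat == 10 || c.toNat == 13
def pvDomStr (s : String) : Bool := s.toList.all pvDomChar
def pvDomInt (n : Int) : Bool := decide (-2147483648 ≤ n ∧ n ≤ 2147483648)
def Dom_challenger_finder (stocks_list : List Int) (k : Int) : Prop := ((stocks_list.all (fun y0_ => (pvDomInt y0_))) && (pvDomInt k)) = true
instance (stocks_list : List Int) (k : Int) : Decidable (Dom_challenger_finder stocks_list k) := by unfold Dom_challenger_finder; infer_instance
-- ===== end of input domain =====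

-- B replaces A's O(n^2) pairwise double loop by sort + binary-search range counting (O(n log n)); same return value.

-- ===== PORT A =====
-- inner loop body: 'if abs(stocks_list[i]-stocks_list[j]) <= k: result[i] += 1; result[j] += 1'
def cfInner (st : List Int) (k : Int) (i : Int) (res : List Int) (j : Int) : List Int :=
  if |PySem.List.pyGetD st i 0 - PySem.List.pyGetD st j 0| ≤ k then
    let r1 := PySem.List.pySetD res i (PySem.List.pyGetD res i 0 + 1)
    PySem.List.pySetD r1 j (PySem.List.pyGetD r1 j 0 + 1)
  else res

-- 'for j in range(i+1, len(stocks_list)): …'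
def cfOuter (st : List Int) (k : Int) (res : List Int) (i : Int) : List Int :=
  (PySem.List.pyRange (i+1) (st.length : Int) 1).foldl (cfInner st k i) res

def challenger_finder (stocks_list : List Int) (k : Int) : List Int :=
  let result : List Int :=
    (PySem.List.pyRange 0 (stocks_list.length : Int) 1).foldl (fun r _ => r ++ [(0:Int)]) []
  (PySem.List.pyRange 0 ((stocks_list.length : Int) - 1) 1).foldl (cfOuter stocks_list k) result

-- ===== PORT B =====
-- Source B's _count_lt/_count_le are the standard lo/hi halving loops = PySem.List.bisectLeft / bisectRight, step for step.
def challenger_finder_alt (stocks_list : List Int) (k : Int) : List Int :=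
  if k < 0 then List.replicate stocks_list.length 0
  else
    let s := PySem.List.sorted stocks_list (fun x => x) false
    stocks_list.map (fun v =>
      ((PySem.List.bisectRight s (v + k) : Int) - (PySem.List.bisectLeft s (v - k) : Int) - 1))

-- ===== PRECONDITION & SPEC =====
def Spec_challenger_finder (stocks_list : List Int) (k : Int) (out : List Int) : Prop := out = challenger_finder_alt stocks_list k
instance (stocks_list : List Int) (k : Int) (out : List Int) : Decidable (Spec_challenger_finder stocks_list k out) := by unfold Spec_challenger_finder; infer_instance

-- ===== CLAIM (what is proved, stated in full; the proofs are below) =====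
def Claim_equal_challenger_finder : Prop := ∀ (stocks_list : List Int) (k : Int), Dom_challenger_finder stocks_list k → Spec_challenger_finder stocks_list k (challenger_finder stocks_list k)

-- ===== LEMMAS AND PROOFS =====

-- Bool test of A's inner if
def condB (st : List Int) (k i j : Int) : Bool :=
  decide (|PySem.List.pyGetD st i 0 - PySem.List.pyGetD st j 0| ≤ k)

-- number of partners of index i among indices in [a, n)
def cnt (st : List Int) (k a i : Int) : Nat :=
  (PySem.List.pyRange a (st.length : Int) 1).countP (fun j => condB st k i j)

-- contribution of outer iteration i to result[t]
def delta (st : List Int) (k i t : Int) : Int :=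
  if t = i then (cnt st k (i+1) i : Int)
  else if i + 1 ≤ t ∧ condB st k i t then 1 else 0

def sumDelta (st : List Int) (k m t : Int) : Int :=
  ((PySem.List.pyRange m ((st.length : Int) - 1) 1).map (fun i => delta st k i t)).sum

lemma pyGetD_pySetD' (res : List Int) (i v t : Int) (hi0 : 0 ≤ i) (hi : i < (res.length : Int))
    (ht0 : 0 ≤ t) (ht : t < (res.length : Int)) :
    PySem.List.pyGetD (PySem.List.pySetD res i v) t 0 =
      if t = i then v else PySem.List.pyGetD res t 0 := by
  rw [PySem.List.pySetD_of_nonneg res v hi0]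
  rw [PySem.List.pyGetD_eq_getElem _ 0 ht0 (by simpa using ht),
    PySem.List.pyGetD_eq_getElem res 0 ht0 ht]
  rw [List.getElem_set]
  split <;> split <;> first | rfl | omega

lemma cfInner_length (st : List Int) (k i : Int) (res : List Int) (a : Int) :
    (cfInner st k i res a).length = res.length := by
  unfold cfInner
  split
  · simp [PySem.List.length_pySetD]
  · rfl

lemma cfInner_getD (st : List Int) (k i : Int) (res : List Int) (a t : Int)
    (hres : res.length = st.length) (hi0 : 0 ≤ i) (hia : i < a) (han : a < (st.length : Int))
    (ht0 : 0 ≤ t) (htn : t < (st.length : Int)) :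
    PySem.List.pyGetD (cfInner st k i res a) t 0 =
      PySem.List.pyGetD res t 0 + (if condB st k i a ∧ (t = i ∨ t = a) then 1 else 0) := by
  have hlen1 : (PySem.List.pySetD res i (PySem.List.pyGetD res i 0 + 1)).length = res.length :=
    PySem.List.length_pySetD ..
  unfold cfInner condB
  split
  · rename_i hcond
    rw [pyGetD_pySetD' _ a _ t (by omega) (by omega) ht0 (by omega)]
    rw [pyGetD_pySetD' res i _ a hi0 (by omega) (by omega) (by omega)]
    rw [pyGetD_pySetD' res i _ t hi0 (by omega) ht0 (by omega)]
    have hia' : a ≠ i := by omega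
    simp only [hia', if_false, decide_eq_true_eq]
    by_cases h1 : t = a <;> by_cases h2 : t = i <;> simp [h1, h2, hcond] <;> omega
  · rename_i hcond
    simp only [decide_eq_true_eq]
    rw [if_neg (by tauto)]
    ring

lemma inner_loop (st : List Int) (k i a : Int) (res : List Int)
    (hres : res.length = st.length) (hi0 : 0 ≤ i) (hia : i < a) :
    ((PySem.List.pyRange a (st.length : Int) 1).foldl (cfInner st k i) res).length = st.length ∧
    ∀ t : Int, 0 ≤ t → t < (st.length : Int) →
      PySem.List.pyGetD ((PySem.List.pyRange a (st.length : Int) 1).foldl (cfInner st k i) res) t 0 =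
        PySem.List.pyGetD res t 0 +
          (if t = i then (cnt st k a i : Int) else if a ≤ t ∧ condB st k i t then 1 else 0) := by
  by_cases hna : (st.length : Int) ≤ a
  · rw [PySem.List.pyRange_one_eq_nil hna]
    refine ⟨by simpa using hres, fun t ht0 htn => ?_⟩
    have hcnt : cnt st k a i = 0 := by
      unfold cnt; rw [PySem.List.pyRange_one_eq_nil hna]; rfl
    have hat : ¬ (a ≤ t) := by omega
    simp [hcnt, hat]
  · push_neg at hna
    rw [PySem.List.pyRange_one_cons hna]
    simp only [List.foldl_cons]
    have hres1 : (cfInner st k i res a).length = st.length := by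
      rw [cfInner_length]; exact hres
    have key := inner_loop st k i (a+1) (cfInner st k i res a) hres1 hi0 (by omega)
    refine ⟨key.1, fun t ht0 htn => ?_⟩
    rw [key.2 t ht0 htn]
    rw [cfInner_getD st k i res a t hres hi0 hia hna ht0 htn]
    have hcnt : (cnt st k a i : Int) = (cnt st k (a+1) i : Int) + (if condB st k i a then 1 else 0) := by
      unfold cnt
      rw [PySem.List.pyRange_one_cons hna, List.countP_cons]
      split <;> simp <;> omega
    have hai : a ≠ i := by omega
    by_cases h1 : t = i
    · have hta : ¬ (t = a) := by omega
      by_cases hc : condB st k i a = true <;> simp only [h1, hcnt, hc] <;> simp [hta] <;> ring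
    · simp only [if_neg h1]
      by_cases h2 : t = a
      · have h3 : ¬ (a + 1 ≤ t) := by omega
        have h4 : a ≤ t := by omega
        by_cases hc : condB st k i t = true <;> simp_all
      · have h3 : (a + 1 ≤ t) ↔ (a ≤ t) := by omega
        by_cases hc : condB st k i t = true <;> simp_all
termination_by ((st.length : Int) - a).toNat
decreasing_by omega

lemma outer_loop (st : List Int) (k m : Int) (res : List Int)
    (hres : res.length = st.length) (hm0 : 0 ≤ m) :
    ((PySem.List.pyRange m ((st.length : Int) - 1) 1).foldl (cfOuter st k) res).length = st.length ∧
    ∀ t : Int, 0 ≤ t → t < (st.length : Int) →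
      PySem.List.pyGetD ((PySem.List.pyRange m ((st.length : Int) - 1) 1).foldl (cfOuter st k) res) t 0 =
        PySem.List.pyGetD res t 0 + sumDelta st k m t := by
  by_cases hnm : (st.length : Int) - 1 ≤ m
  · rw [PySem.List.pyRange_one_eq_nil hnm]
    refine ⟨hres, fun t ht0 htn => ?_⟩
    unfold sumDelta
    rw [PySem.List.pyRange_one_eq_nil hnm]
    simp
  · push_neg at hnm
    rw [PySem.List.pyRange_one_cons hnm]
    simp only [List.foldl_cons]
    have hinner := inner_loop st k m (m+1) res hres hm0 (by omega)
    have hres1 : (cfOuter st k res m).length = st.length := by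
      unfold cfOuter; exact hinner.1
    have key := outer_loop st k (m+1) (cfOuter st k res m) hres1 (by omega)
    refine ⟨key.1, fun t ht0 htn => ?_⟩
    rw [key.2 t ht0 htn]
    have h2 : PySem.List.pyGetD (cfOuter st k res m) t 0 =
        PySem.List.pyGetD res t 0 + delta st k m t := by
      unfold cfOuter delta
      rw [hinner.2 t ht0 htn]
    rw [h2]
    have hsum : sumDelta st k m t = delta st k m t + sumDelta st k (m+1) t := by
      unfold sumDelta
      rw [PySem.List.pyRange_one_cons hnm]
      simp
    rw [hsum]
    ring
termination_by ((st.length : Int) - 1 - m).toNat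
decreasing_by omega

lemma init_replicate (st : List Int) :
    (PySem.List.pyRange 0 (st.length : Int) 1).foldl (fun r _ => r ++ [(0:Int)]) [] =
      List.replicate st.length (0:Int) := by
  rw [show (fun (r : List Int) (_ : Int) => r ++ [(0:Int)]) =
      (fun (acc : List Int) (x : Int) => acc ++ [(fun (_ : Int) => (0:Int)) x]) from rfl]
  rw [PySem.List.foldl_append_singleton_eq_map]
  simp [List.eq_replicate_iff, PySem.List.length_pyRange_one]

lemma A_length (st : List Int) (k : Int) : (challenger_finder st k).length = st.length := by
  unfold challenger_finder
  rw [init_replicate]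
  exact (outer_loop st k 0 _ (by simp) le_rfl).1

lemma A_getD (st : List Int) (k t : Int) (ht0 : 0 ≤ t) (htn : t < (st.length : Int)) :
    PySem.List.pyGetD (challenger_finder st k) t 0 = sumDelta st k 0 t := by
  unfold challenger_finder
  rw [init_replicate]
  rw [(outer_loop st k 0 _ (by simp) le_rfl).2 t ht0 htn]
  rw [PySem.List.pyGetD_eq_getElem _ 0 ht0 (by simpa using htn)]
  simp

lemma countP_eq_of_getElem (s : List Int) (p : Int → Bool) (m : Nat) (hm : m ≤ s.length)
    (h1 : ∀ j (hj : j < s.length), j < m → p s[j] = true)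
    (h2 : ∀ j (hj : j < s.length), m ≤ j → p s[j] = false) : s.countP p = m := by
  conv_lhs => rw [← List.take_append_drop m s]
  rw [List.countP_append]
  have hT : (s.take m).countP p = (s.take m).length := by
    rw [List.countP_eq_length]
    intro a ha
    obtain ⟨j, hj, rfl⟩ := List.mem_iff_getElem.1 ha
    rw [List.getElem_take]
    exact h1 j (by simp at hj; omega) (by simp at hj; omega)
  have hD : (s.drop m).countP p = 0 := by
    rw [List.countP_eq_zero]
    intro a ha
    obtain ⟨j, hj, rfl⟩ := List.mem_iff_getElem.1 ha
    rw [List.getElem_drop]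
    simp [h2 (m + j) (by simp at hj; omega) (by omega)]
  rw [hT, hD, List.length_take]
  omega

lemma bisectRight_eq_countP (s : List Int) (x : Int) (hs : s.Pairwise (· ≤ ·)) :
    PySem.List.bisectRight s x = s.countP (fun w => decide (w ≤ x)) := by
  obtain ⟨h0, h1, h2⟩ := PySem.List.bisectRight_spec s x hs
  exact (countP_eq_of_getElem s _ _ h0
    (fun j hj hjm => by simpa using h1 j hj hjm)
    (fun j hj hjm => by simpa using not_le.2 (h2 j hj hjm))).symm

lemma bisectLeft_eq_countP (s : List Int) (x : Int) (hs : s.Pairwise (· ≤ ·)) :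
    PySem.List.bisectLeft s x = s.countP (fun w => decide (w < x)) := by
  obtain ⟨h0, h1, h2⟩ := PySem.List.bisectLeft_spec s x hs
  exact (countP_eq_of_getElem s _ _ h0
    (fun j hj hjm => by simpa using h1 j hj hjm)
    (fun j hj hjm => by simpa using not_lt.2 (h2 j hj hjm))).symm

lemma countP_le_split (lo hi : Int) (h : lo ≤ hi) (s : List Int) :
    s.countP (fun w => decide (w ≤ hi)) =
      s.countP (fun w => decide (w < lo)) + s.countP (fun w => decide (lo ≤ w) && decide (w ≤ hi)) := by
  induction s with
  | nil => rfl
  | cons a tl ih =>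
    simp only [List.countP_cons, ih]
    by_cases h1 : a ≤ hi <;> by_cases h2 : lo ≤ a <;>
      simp [h1, h2, show (a < lo) ↔ ¬ lo ≤ a from by omega] <;> omega

lemma sumDelta_neg (st : List Int) (k t : Int) (hk : k < 0) : sumDelta st k 0 t = 0 := by
  have hcond : ∀ i j : Int, condB st k i j = false := by
    intro i j
    unfold condB
    simp only [decide_eq_false_iff_not]
    have := abs_nonneg (PySem.List.pyGetD st i 0 - PySem.List.pyGetD st j 0)
    omega
  have hdelta : ∀ i : Int, delta st k i t = 0 := by
    intro i
    unfold delta cnt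
    have h1 : (PySem.List.pyRange (i+1) (st.length : Int) 1).countP (fun j => condB st k i j) = 0 := by
      rw [List.countP_eq_zero]
      intro a _
      simp [hcond]
    simp [h1, hcond]
  rw [sumDelta, List.map_congr_left (fun i _ => hdelta i)]
  simp

lemma count_identity (st : List Int) (k t : Int) (hk : 0 ≤ k) (ht0 : 0 ≤ t)
    (htn : t < (st.length : Int)) :
    sumDelta st k 0 t =
      (st.countP (fun w =>
        decide (PySem.List.pyGetD st t 0 - k ≤ w) && decide (w ≤ PySem.List.pyGetD st t 0 + k)) : Int) - 1 := by
  have habs : ∀ i j : Int, condB st k i j = condB st k j i := by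
    intro i j; unfold condB; rw [abs_sub_comm]
  -- part 1 : [0,t)
  have part1 : ((PySem.List.pyRange 0 t 1).map (fun i => delta st k i t)).sum =
      ((PySem.List.pyRange 0 t 1).countP (fun i => condB st k t i) : Int) := by
    rw [List.map_congr_left (l := PySem.List.pyRange 0 t 1)
      (g := fun i => if condB st k t i then (1:Int) else 0) ?_]
    · exact PySem.List.sum_map_ite_one_zero _ _
    · intro i hi
      rw [PySem.List.mem_pyRange_one] at hi
      unfold delta
      have h1 : ¬ (t = i) := by omega
      have h2 : i + 1 ≤ t := by omega
      simp [h1, h2, habs i t]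
  -- part 2 : [t, n-1)
  have part2 : ((PySem.List.pyRange t ((st.length : Int) - 1) 1).map (fun i => delta st k i t)).sum =
      ((PySem.List.pyRange (t+1) (st.length : Int) 1).countP (fun j => condB st k t j) : Int) := by
    by_cases hlast : t < (st.length : Int) - 1
    · rw [PySem.List.pyRange_one_cons hlast]
      simp only [List.map_cons, List.sum_cons]
      have hd : delta st k t t = (cnt st k (t+1) t : Int) := by unfold delta; simp
      have hrest : ((PySem.List.pyRange (t+1) ((st.length : Int) - 1) 1).map (fun i => delta st k i t)).sum = 0 := by
        rw [List.map_congr_left (g := fun _ => (0:Int)) ?_]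
        · simp
        · intro i hi
          rw [PySem.List.mem_pyRange_one] at hi
          unfold delta
          have h1 : ¬ (t = i) := by omega
          have h2 : ¬ (i + 1 ≤ t) := by omega
          simp [h1, h2]
      rw [hd, hrest]
      unfold cnt
      have : (fun j => condB st k t j) = fun j => condB st k t j := rfl
      simp
    · have h1 : (st.length : Int) - 1 ≤ t := by omega
      have h2 : (st.length : Int) ≤ t + 1 := by omega
      rw [PySem.List.pyRange_one_eq_nil h1, PySem.List.pyRange_one_eq_nil h2]
      simp
  -- sumDelta = part1 + part2
  have hsplit : sumDelta st k 0 t =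
      ((PySem.List.pyRange 0 t 1).countP (fun i => condB st k t i) : Int) +
      ((PySem.List.pyRange (t+1) (st.length : Int) 1).countP (fun j => condB st k t j) : Int) := by
    unfold sumDelta
    rw [PySem.List.pyRange_one_append 0 t ((st.length : Int) - 1) ht0 (by omega)]
    rw [List.map_append, List.sum_append, part1, part2]
  -- full-range count
  have hfull : (PySem.List.pyRange 0 (st.length : Int) 1).countP (fun j => condB st k t j) =
      (PySem.List.pyRange 0 t 1).countP (fun i => condB st k t i) +
      (PySem.List.pyRange (t+1) (st.length : Int) 1).countP (fun j => condB st k t j) + 1 := by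
    have e1 : PySem.List.pyRange 0 (st.length : Int) 1 =
        PySem.List.pyRange 0 t 1 ++ (t :: PySem.List.pyRange (t+1) (st.length : Int) 1) := by
      rw [PySem.List.pyRange_one_append 0 t (st.length : Int) ht0 (by omega),
        PySem.List.pyRange_one_cons htn]
    rw [e1, List.countP_append, List.countP_cons]
    have hself : condB st k t t = true := by
      unfold condB
      simp only [sub_self, abs_zero, decide_eq_true_eq]
      exact hk
    simp only [hself, if_true, cond_true, Bool.true_eq, decide_eq_true_eq]
    omega
  have hg : ∀ key : Int, st.countP (fun w => decide (key - k ≤ w) && decide (w ≤ key + k)) =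
      (PySem.List.pyRange 0 (st.length : Int) 1).countP
        (fun j => decide (|key - PySem.List.pyGetD st j 0| ≤ k)) := by
    intro key
    conv_lhs => rw [← PySem.List.map_pyGetD_pyRange_zero st 0]
    rw [List.countP_map]
    simp only [PySem.List.len_eq]
    apply List.countP_congr
    intro j _
    simp only [Function.comp_apply]
    rw [Bool.eq_iff_iff]
    simp only [Bool.and_eq_true, decide_eq_true_eq, abs_le, iff_true]
    omega
  rw [hsplit, hg (PySem.List.pyGetD st t 0)]
  have hcb : (fun j => decide (|PySem.List.pyGetD st t 0 - PySem.List.pyGetD st j 0| ≤ k)) =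
      (fun j => condB st k t j) := rfl
  rw [hcb, hfull]
  push_cast
  ring

-- ===== VERDICT (by name: the statement is the Claim_ definition above) =====
theorem challenger_finder_spec : Claim_equal_challenger_finder := by
  intro st k _
  unfold Spec_challenger_finder
  apply List.ext_getElem
  · rw [A_length]
    unfold challenger_finder_alt
    split <;> simp
  · intro i h1 h2
    have hlen : i < st.length := by rwa [A_length] at h1
    have hA : (challenger_finder st k)[i] = sumDelta st k 0 (i : Int) := by
      have h := A_getD st k (i : Int) (by positivity) (by exact_mod_cast hlen)
      rw [PySem.List.pyGetD_natCast, List.getD_eq_getElem _ _ h1] at h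
      exact h
    rw [hA]
    by_cases hk : k < 0
    · simp only [challenger_finder_alt, if_pos hk]
      rw [sumDelta_neg st k _ hk]
      simp
    · push_neg at hk
      simp only [challenger_finder_alt, if_neg (not_lt.2 hk)]
      rw [List.getElem_map]
      have hs : (PySem.List.sorted st (fun x => x) false).Pairwise (· ≤ ·) := by
        simpa using PySem.List.sorted_pairwise st (fun x => x)
      rw [bisectRight_eq_countP _ _ hs, bisectLeft_eq_countP _ _ hs]
      rw [countP_le_split (st[i]'hlen - k) (st[i]'hlen + k) (by omega)
        (PySem.List.sorted st (fun x => x) false)]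
      have hkey : PySem.List.pyGetD st (i : Int) 0 = st[i]'hlen := by
        rw [PySem.List.pyGetD_natCast, List.getD_eq_getElem _ _ hlen]
      rw [count_identity st k (i : Int) hk (by positivity) (by exact_mod_cast hlen), hkey]
      rw [(PySem.List.sorted_perm st (fun x => x) false).countP_eq]
      rw [(PySem.List.sorted_perm st (fun x => x) false).countP_eq]
      push_cast
      ring
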